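-- pv_equiv track=rewrite | github.com/r-aax/crys-gsu | crysgsu/convert/ansys_to_crystal.py | variables_names_and_mask
-- ===== SOURCE A (Python) =====
-- def is_variable_names_match(fn, sn):
--     """
--     Проверка, что искомая переменная совпадает с переменной из файла.
--
--     Arguments:
--         fn -- переменная из файла,
--         sn -- искомая переменная.
--
--     Result:
--         True -- если искомая переменная совпадает с переменной из файла,
--         False -- в противном случае.
--     """
--
--     if len(sn) == 1:
--         return sn == fn
--     else:
--         return sn in fn
--
-- def variables_names_and_mask(fnames, snames):
--     """
--     Поиск маски переменных из файла (fnames), которые были найдены в списке snames.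
--     Переименование переменных в списке имен переменных из файла.
--
--     Arguments:
--         fnames -- имена переменных из файла,
--         snames -- искомые имена.
--
--     Result:
--         Кортеж.
--         Первый элемент кортежа - список переменных с переименовынными переменными.
--         Второй элемент кортежа - маска переменных.
--     """
--
--     mask = [0] * len(fnames)
--
--     for (fi, fn) in enumerate(fnames):
--         for sn in snames:
--             if is_variable_names_match(fn, sn):
--                 fnames[fi] = sn
--                 mask[fi] = 1
--
--     return fnames, mask
-- ===== SOURCE B (Python) =====
-- def is_variable_names_match(fn, sn):
--     if len(sn) == 1:
--         return sn == fn
--     else: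
--         return sn in fn
--
--
-- def variables_names_and_mask(fnames, snames):
--     # Stage 1: index the search names once — single-char names (exact-match rule)
--     # go into a hash map keyed by the name (last index wins), multi-char names
--     # (substring rule) into a pattern list with their indices.
--     singles = {}
--     patterns = []
--     for j, sn in enumerate(snames):
--         if len(sn) == 1:
--             singles[sn] = (j, sn)
--         else:
--             patterns.append((j, sn))
--     # Stage 2: per file name, one dict lookup plus a scan of the substring
--     # patterns, keeping the match with the largest snames-index (last match wins).
--     names = []
--     mask = []
--     for fn in fnames:
--         best_j, best_name = singles.get(fn, (-1, fn))
--         for j, sn in patterns: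
--             if sn in fn and j > best_j:
--                 best_j, best_name = j, sn
--         names.append(best_name)
--         mask.append(1 if best_j >= 0 else 0)
--     fnames[:] = names  # preserve A's in-place update of fnames
--     return fnames, mask
-- ===== Notes on version B (the rewrite author's own statement) =====
-- stated objective: alternative
-- what changed: Replaces A's nested overwrite loops by a two-stage pipeline: snames are pre-indexed once into a hash map of exact-match single-char names (last index wins) and a list of substring patterns, then each file name does one dict lookup plus a pattern scan keeping the largest-index match; the mask bit is derived from the sign of the winning index instead of being overwritten in place.
import Mathlib
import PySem

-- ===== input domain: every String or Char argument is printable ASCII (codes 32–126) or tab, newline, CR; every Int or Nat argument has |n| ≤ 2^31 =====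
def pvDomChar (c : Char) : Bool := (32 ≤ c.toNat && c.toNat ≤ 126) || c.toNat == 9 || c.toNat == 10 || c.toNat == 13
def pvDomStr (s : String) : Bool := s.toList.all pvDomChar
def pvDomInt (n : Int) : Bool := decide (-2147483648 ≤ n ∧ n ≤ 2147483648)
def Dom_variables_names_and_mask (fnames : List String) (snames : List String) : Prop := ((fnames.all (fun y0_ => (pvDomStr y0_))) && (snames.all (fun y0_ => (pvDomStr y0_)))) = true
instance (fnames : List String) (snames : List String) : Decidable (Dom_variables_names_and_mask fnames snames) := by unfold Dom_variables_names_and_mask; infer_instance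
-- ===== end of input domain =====

-- B pre-indexes snames (hash map for single-char exact names, a pattern list for
-- substring names) and picks the largest-index match per file name (alternative
-- decomposition); equivalence is about the RETURN value (B also updates fnames in
-- place in Python, via fnames[:] = ...).

-- ===== PORT A =====
def is_variable_names_match (fn : String) (sn : String) : Bool :=
  if PySem.Str.len sn == 1 then sn == fn else PySem.Str.isIn sn fn

-- enumerate(fnames) over the live mutated list is exact here: each iteration mutates
-- only the index it has already yielded, so the yielded pairs are those of the input.
-- fi comes from enumerate so fi ≥ 0 and .toNat is exact.
def variables_names_and_mask (fnames : List String) (snames : List String) : List String × List Int :=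
  let mask : List Int := List.replicate fnames.length 0
  (PySem.List.enumerate fnames 0).foldl
    (fun st p =>
      snames.foldl
        (fun st2 sn =>
          if is_variable_names_match p.2 sn then (st2.1.set p.1.toNat sn, st2.2.set p.1.toNat 1)
          else st2)
        st)
    (fnames, mask)

-- ===== PORT B =====
-- Stage 1: index snames once — dict of single-char names (key sn, value (j, sn),
-- overwrite = last index wins) and the list of (index, multi-char pattern).
def buildIndex (snames : List String) : PySem.Dict String (Int × String) × List (Int × String) :=
  (PySem.List.enumerate snames 0).foldl
    (fun st p =>
      if PySem.Str.len p.2 == 1 then (st.1.insert p.2 p, st.2) else (st.1, st.2 ++ [p]))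
    (PySem.Dict.empty, [])

-- Stage 2 per file name: dict lookup, then keep the largest-index matching pattern.
def bestFor (idx : PySem.Dict String (Int × String) × List (Int × String)) (fn : String) :
    Int × String :=
  idx.2.foldl
    (fun b p => if PySem.Str.isIn p.2 fn && decide (b.1 < p.1) then p else b)
    (idx.1.getD fn (-1, fn))

def variables_names_and_mask_alt (fnames : List String) (snames : List String) :
    List String × List Int :=
  let idx := buildIndex snames
  let results := fnames.map (fun fn =>
    let b := bestFor idx fn
    (b.2, if b.1 ≥ 0 then (1 : Int) else 0))
  (results.map Prod.fst, results.map Prod.snd)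

-- ===== PRECONDITION & SPEC =====
def Spec_variables_names_and_mask (fnames : List String) (snames : List String) (out : List String × List Int) : Prop := out = variables_names_and_mask_alt fnames snames
instance (fnames : List String) (snames : List String) (out : List String × List Int) : Decidable (Spec_variables_names_and_mask fnames snames out) := by unfold Spec_variables_names_and_mask; infer_instance

-- ===== CLAIM (what is proved, stated in full; the proofs are below) =====
def Claim_equal_variables_names_and_mask : Prop := ∀ (fnames : List String) (snames : List String), Dom_variables_names_and_mask fnames snames → Spec_variables_names_and_mask fnames snames (variables_names_and_mask fnames snames)

-- ===== LEMMAS AND PROOFS =====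

-- Proof-side characterisation of both programs' per-name answer: the last matching
-- search name (= first match of snames.reverse), or the name itself.
def pickName (snames : List String) (fn : String) : String × Int :=
  match snames.reverse.find? (fun sn => is_variable_names_match fn sn) with
  | some sn => (sn, 1)
  | none => (fn, 0)

-- A's inner loop over snames only rewrites index fi; its net effect is a set by the
-- last matching sname (= first match of snames.reverse), or nothing.
theorem inner_fold_eq (fn : String) (fi : Nat) :
    ∀ (l : List String) (st : List String × List Int),
      l.foldl
        (fun st2 sn =>
          if is_variable_names_match fn sn then (st2.1.set fi sn, st2.2.set fi 1) else st2)
        st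
      = match l.reverse.find? (fun sn => is_variable_names_match fn sn) with
        | some sn => (st.1.set fi sn, st.2.set fi (1 : Int))
        | none => st := by
  intro l
  induction l with
  | nil => intro st; simp
  | cons sn tl ih =>
    intro st
    simp only [List.foldl_cons, List.reverse_cons, List.find?_append]
    by_cases h : is_variable_names_match fn sn
    · rw [if_pos h, ih]
      cases hf : tl.reverse.find? (fun s => is_variable_names_match fn s) with
      | some x => simp [List.set_set]
      | none => simp [h]
    · rw [if_neg h, ih]
      cases hf : tl.reverse.find? (fun s => is_variable_names_match fn s) with
      | some x => simp
      | none => simp [h]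

theorem set_len_append {α : Type} (l : List α) (a : α) (t : List α) (v : α) :
    (l ++ a :: t).set l.length v = l ++ v :: t := by
  induction l with
  | nil => rfl
  | cons x xs ih => simp [ih]

-- The outer loop: processed prefix stays, each remaining index gets pickName's value.
theorem outer_fold_eq (snames : List String) :
    ∀ (xs pre1 : List String) (pre2 : List Int), pre2.length = pre1.length →
      (PySem.List.enumerate xs (pre1.length : Int)).foldl
        (fun st p =>
          snames.foldl
            (fun st2 sn =>
              if is_variable_names_match p.2 sn then (st2.1.set p.1.toNat sn, st2.2.set p.1.toNat 1)
              else st2)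
            st)
        (pre1 ++ xs, pre2 ++ List.replicate xs.length 0)
      = (pre1 ++ xs.map (fun fn => (pickName snames fn).1),
         pre2 ++ xs.map (fun fn => (pickName snames fn).2)) := by
  intro xs
  induction xs with
  | nil => intro pre1 pre2 _; simp [PySem.List.enumerate_nil]
  | cons fn xtl ih =>
    intro pre1 pre2 hlen
    rw [PySem.List.enumerate_cons, List.foldl_cons]
    simp only [List.length_cons, List.replicate_succ]
    have htoNat : ((pre1.length : Int)).toNat = pre1.length := by simp
    rw [inner_fold_eq fn ((pre1.length : Int)).toNat snames
        (pre1 ++ fn :: xtl, pre2 ++ 0 :: List.replicate xtl.length 0)]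
    cases hf : (snames.reverse.find? (fun sn => is_variable_names_match fn sn)) with
    | some sn =>
      simp only [htoNat]
      rw [set_len_append pre1 fn xtl sn]
      have h2 : (pre2 ++ 0 :: List.replicate xtl.length 0).set pre1.length (1 : Int)
          = pre2 ++ 1 :: List.replicate xtl.length 0 := by
        rw [← hlen]; exact set_len_append pre2 0 _ 1
      rw [h2]
      have : ((pre1.length : Int) + 1) = (((pre1 ++ [sn]).length : Nat) : Int) := by
        simp
      rw [show (pre1 ++ sn :: xtl) = (pre1 ++ [sn]) ++ xtl by simp,
          show (pre2 ++ 1 :: List.replicate xtl.length 0)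
             = (pre2 ++ [(1 : Int)]) ++ List.replicate xtl.length 0 by simp,
          this, ih (pre1 ++ [sn]) (pre2 ++ [1]) (by simp [hlen])]
      simp [pickName, hf]
    | none =>
      have : ((pre1.length : Int) + 1) = (((pre1 ++ [fn]).length : Nat) : Int) := by
        simp
      rw [show (pre1 ++ fn :: xtl) = (pre1 ++ [fn]) ++ xtl by simp,
          show (pre2 ++ 0 :: List.replicate xtl.length 0)
             = (pre2 ++ [(0 : Int)]) ++ List.replicate xtl.length 0 by simp,
          this, ih (pre1 ++ [fn]) (pre2 ++ [0]) (by simp [hlen])]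
      simp [pickName, hf]

-- buildIndex over an appended element is one step on buildIndex of the prefix.
theorem buildIndex_append (l : List String) (s : String) :
    buildIndex (l ++ [s])
      = if PySem.Str.len s == 1
        then ((buildIndex l).1.insert s ((l.length : Int), s), (buildIndex l).2)
        else ((buildIndex l).1, (buildIndex l).2 ++ [((l.length : Int), s)]) := by
  unfold buildIndex
  rw [PySem.List.enumerate_append, List.foldl_append]
  simp [PySem.List.enumerate_cons]

-- The pattern scan never overrides a best index at least as large as every pattern index.
theorem scan_no_override (fn : String) (N : Int) :
    ∀ (ms : List (Int × String)) (b : Int × String),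
      (∀ p ∈ ms, p.1 < N) → N ≤ b.1 →
      ms.foldl (fun b p => if PySem.Str.isIn p.2 fn && decide (b.1 < p.1) then p else b) b = b := by
  intro ms
  induction ms with
  | nil => intro b _ _; rfl
  | cons q tl ih =>
    intro b hm hb
    have hq : q.1 < N := hm q (by simp)
    have : (PySem.Str.isIn q.2 fn && decide (b.1 < q.1)) = false := by
      have : ¬ (b.1 < q.1) := by omega
      simp [this]
    simp only [List.foldl_cons, this, Bool.false_eq_true]
    exact ih b (fun p hp => hm p (by simp [hp])) hb

-- The pattern scan keeps the best index below any common bound.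
theorem scan_bound (fn : String) (N : Int) :
    ∀ (ms : List (Int × String)) (b : Int × String),
      (∀ p ∈ ms, p.1 < N) → b.1 < N →
      (ms.foldl (fun b p => if PySem.Str.isIn p.2 fn && decide (b.1 < p.1) then p else b) b).1 < N := by
  intro ms
  induction ms with
  | nil => intro b _ hb; exact hb
  | cons q tl ih =>
    intro b hm hb
    simp only [List.foldl_cons]
    by_cases h : (PySem.Str.isIn q.2 fn && decide (b.1 < q.1)) = true
    · rw [if_pos h]
      exact ih q (fun p hp => hm p (by simp [hp])) (hm q (by simp))
    · rw [if_neg h]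
      exact ih b (fun p hp => hm p (by simp [hp])) hb

-- Master invariant on the built index, plus the per-name correctness of bestFor.
theorem bestFor_spec (snames : List String) :
    (∀ p ∈ (buildIndex snames).2, p.1 < (snames.length : Int)) ∧
    (∀ fn, ((buildIndex snames).1.getD fn (-1, fn)).1 < (snames.length : Int)) ∧
    (∀ fn,
      match snames.reverse.find? (fun sn => is_variable_names_match fn sn) with
      | some sn => (bestFor (buildIndex snames) fn).2 = sn ∧ 0 ≤ (bestFor (buildIndex snames) fn).1
      | none => bestFor (buildIndex snames) fn = (-1, fn)) := by
  induction snames using List.reverseRecOn with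
  | nil =>
    refine ⟨by simp [buildIndex], by simp [buildIndex, PySem.Dict.getD_empty], ?_⟩
    intro fn
    simp [bestFor, buildIndex, PySem.Dict.getD_empty]
  | append_singleton l s ih =>
    obtain ⟨ihms, ihd, ihc⟩ := ih
    have hlen : ((l ++ [s]).length : Int) = (l.length : Int) + 1 := by simp
    by_cases hs : PySem.Str.len s == 1
    · -- s is a single-char name: inserted into the dict
      have hb := buildIndex_append l s
      rw [if_pos hs] at hb
      refine ⟨?_, ?_, ?_⟩
      · intro p hp; rw [hb] at hp
        have := ihms p hp; omega
      · intro fn; rw [hb]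
        by_cases hfs : fn = s
        · subst hfs
          dsimp only
          rw [PySem.Dict.getD_insert_self]
          simp
        · dsimp only
          rw [PySem.Dict.getD_insert, if_neg hfs]
          have := ihd fn; omega
      · intro fn
        rw [List.reverse_append, List.reverse_singleton, List.singleton_append]
        by_cases hm : is_variable_names_match fn s
        · -- s matches fn: since s is single-char, fn = s; the dict now wins
          rw [List.find?_cons_of_pos hm]
          have hfs : s = fn := by
            have : (s == fn) = true := by
              unfold is_variable_names_match at hm
              rw [if_pos hs] at hm; exact hm
            exact eq_of_beq this
          subst hfs
          unfold bestFor
          rw [hb]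
          simp only
          rw [PySem.Dict.getD_insert_self]
          rw [scan_no_override s (l.length : Int) (buildIndex l).2
                (((l.length : Int), s)) (fun p hp => ihms p hp) (le_refl _)]
          simp
        · rw [List.find?_cons_of_neg hm]
          have key : bestFor (buildIndex (l ++ [s])) fn = bestFor (buildIndex l) fn := by
            unfold bestFor
            rw [hb]
            dsimp only
            have hfs : fn ≠ s := by
              intro h; subst h
              apply hm
              unfold is_variable_names_match
              rw [if_pos hs]
              simp
            rw [PySem.Dict.getD_insert, if_neg hfs]
          rw [key]
          exact ihc fn
    · -- s is a substring pattern: appended to the pattern list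
      have hb := buildIndex_append l s
      rw [if_neg hs] at hb
      refine ⟨?_, ?_, ?_⟩
      · intro p hp; rw [hb] at hp
        simp only [List.mem_append, List.mem_singleton] at hp
        cases hp with
        | inl h => have := ihms p h; omega
        | inr h => subst h; simp
      · intro fn; rw [hb]
        dsimp only
        have := ihd fn; omega
      · intro fn
        rw [List.reverse_append, List.reverse_singleton, List.singleton_append]
        by_cases hm : is_variable_names_match fn s
        · rw [List.find?_cons_of_pos hm]
          have hin : PySem.Str.isIn s fn = true := by
            unfold is_variable_names_match at hm
            rw [if_neg hs] at hm; exact hm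
          unfold bestFor
          rw [hb]
          simp only
          rw [List.foldl_append, List.foldl_cons, List.foldl_nil]
          have hlt : ((buildIndex l).2.foldl
              (fun b p => if PySem.Str.isIn p.2 fn && decide (b.1 < p.1) then p else b)
              ((buildIndex l).1.getD fn (-1, fn))).1 < (l.length : Int) :=
            scan_bound fn (l.length : Int) (buildIndex l).2 _ (fun p hp => ihms p hp) (ihd fn)
          rw [if_pos (by rw [hin]; simp only [Bool.true_and, decide_eq_true_eq]; exact hlt)]
          simp
        · rw [List.find?_cons_of_neg hm]
          have hin : PySem.Str.isIn s fn = false := by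
            unfold is_variable_names_match at hm
            rw [if_neg hs] at hm
            exact eq_false_of_ne_true hm
          have key : bestFor (buildIndex (l ++ [s])) fn = bestFor (buildIndex l) fn := by
            unfold bestFor
            rw [hb]
            simp only
            rw [List.foldl_append, List.foldl_cons, List.foldl_nil, if_neg (by rw [hin]; simp)]
          rw [key]
          exact ihc fn

-- B's per-name pair equals pickName.
theorem pick_eq (snames : List String) (fn : String) :
    ((bestFor (buildIndex snames) fn).2,
     if (bestFor (buildIndex snames) fn).1 ≥ 0 then (1 : Int) else 0)
      = pickName snames fn := by
  have h := (bestFor_spec snames).2.2 fn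
  unfold pickName
  cases hf : snames.reverse.find? (fun sn => is_variable_names_match fn sn) with
  | some sn =>
    rw [hf] at h
    obtain ⟨h1, h2⟩ := h
    rw [h1, if_pos h2]
  | none =>
    rw [hf] at h
    rw [h]
    norm_num

-- ===== VERDICT (by name: the statement is the Claim_ definition above) =====
theorem variables_names_and_mask_spec : Claim_equal_variables_names_and_mask := by
  intro fnames snames _
  unfold Spec_variables_names_and_mask variables_names_and_mask variables_names_and_mask_alt
  have h := outer_fold_eq snames fnames [] [] rfl
  simp only [List.nil_append, List.length_nil, Nat.cast_zero] at h
  rw [h]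
  have h1 : ∀ fn, (pickName snames fn).1 = (bestFor (buildIndex snames) fn).2 :=
    fun fn => by rw [← pick_eq]
  have h2 : ∀ fn, (pickName snames fn).2
      = (if (bestFor (buildIndex snames) fn).1 ≥ 0 then (1 : Int) else 0) :=
    fun fn => by rw [← pick_eq]
  dsimp only
  simp only [List.map_map, Function.comp_def, h1, h2]
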